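-- pv_equiv track=rewrite | github.com/linamedani/BDD | Redis/join.py | jointure
-- ===== SOURCE A (Python) =====
-- def jointure(d1, d2, att):
--     resultats_jointure = []  # Liste pour stocker les résultats de jointure
--     for i in d1.keys():
--         for j in d2.keys():
--             if d1[i].get(att) == d2[j].get(att):
--                 resultat = {
--                     'doc1': d1[i],
--                     'doc2': d2[j],
--                 }
--                 resultats_jointure.append(resultat)
--
--     return resultats_jointure
-- ===== SOURCE B (Python) =====
-- def jointure(d1, d2, att):
--     # Hash join: index d2's docs by their value of att, then probe once per d1 doc.
--     index = {}
--     for j in d2: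
--         index.setdefault(d2[j].get(att), []).append(d2[j])
--     resultats_jointure = []
--     for i in d1:
--         doc1 = d1[i]
--         for doc2 in index.get(doc1.get(att), []):
--             resultats_jointure.append({'doc1': doc1, 'doc2': doc2})
--     return resultats_jointure
-- ===== Notes on version B (the rewrite author's own statement) =====
-- stated objective: faster
-- what changed: Replaced the nested loop over all (d1,d2) pairs by a hash join: d2 is indexed once by its att value, and each d1 doc probes the index.
import Mathlib
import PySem

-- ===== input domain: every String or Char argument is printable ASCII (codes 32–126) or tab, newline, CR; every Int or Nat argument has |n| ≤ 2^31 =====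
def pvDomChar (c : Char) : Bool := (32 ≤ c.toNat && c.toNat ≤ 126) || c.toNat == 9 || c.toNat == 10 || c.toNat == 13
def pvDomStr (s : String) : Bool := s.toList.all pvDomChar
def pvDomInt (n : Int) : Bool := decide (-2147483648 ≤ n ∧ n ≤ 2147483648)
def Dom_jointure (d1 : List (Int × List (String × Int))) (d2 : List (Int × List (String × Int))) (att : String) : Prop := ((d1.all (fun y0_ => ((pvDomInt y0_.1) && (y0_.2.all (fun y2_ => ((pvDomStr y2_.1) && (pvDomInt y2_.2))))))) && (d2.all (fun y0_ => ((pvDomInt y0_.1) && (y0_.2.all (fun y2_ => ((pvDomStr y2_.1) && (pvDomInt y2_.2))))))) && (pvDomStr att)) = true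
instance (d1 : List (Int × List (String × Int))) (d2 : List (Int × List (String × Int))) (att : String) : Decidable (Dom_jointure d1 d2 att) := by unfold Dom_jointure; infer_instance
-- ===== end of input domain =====

-- B replaces A's nested-loop equijoin by a hash join (index d2 by att value, probe per d1 doc): asymptotically faster, same output order.


-- doc.get(att): first-match lookup in the inner dict (assoc list), None = none
def pvGetAtt (doc : List (String × Int)) (att : String) : Option Int :=
  (PySem.Dict.mk doc).get? att

-- ===== PORT A =====
def jointure (d1 : List (Int × List (String × Int))) (d2 : List (Int × List (String × Int))) (att : String) : List (List (String × List (String × Int))) :=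
  d1.foldl (fun acc p =>
    d2.foldl (fun acc2 q =>
      if pvGetAtt p.2 att == pvGetAtt q.2 att then
        acc2 ++ [[("doc1", p.2), ("doc2", q.2)]]
      else acc2) acc) []

-- ===== PORT B =====
-- index.setdefault(d2[j].get(att), []).append(d2[j])
def pvIndex (d2 : List (Int × List (String × Int))) (att : String) : PySem.Dict (Option Int) (List (List (String × Int))) :=
  d2.foldl (fun d q => d.modify (pvGetAtt q.2 att) [] (· ++ [q.2])) PySem.Dict.empty

def jointure_alt (d1 : List (Int × List (String × Int))) (d2 : List (Int × List (String × Int))) (att : String) : List (List (String × List (String × Int))) :=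
  let idx := pvIndex d2 att
  d1.foldl (fun acc p =>
    acc ++ (idx.getD (pvGetAtt p.2 att) []).map (fun doc2 => [("doc1", p.2), ("doc2", doc2)])) []

-- ===== PRECONDITION & SPEC =====
def Spec_jointure (d1 : List (Int × List (String × Int))) (d2 : List (Int × List (String × Int))) (att : String) (out : List (List (String × List (String × Int)))) : Prop := out = jointure_alt d1 d2 att
instance (d1 : List (Int × List (String × Int))) (d2 : List (Int × List (String × Int))) (att : String) (out : List (List (String × List (String × Int)))) : Decidable (Spec_jointure d1 d2 att out) := by unfold Spec_jointure; infer_instance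

-- ===== CLAIM (what is proved, stated in full; the proofs are below) =====
def Claim_equal_jointure : Prop := ∀ (d1 : List (Int × List (String × Int))) (d2 : List (Int × List (String × Int))) (att : String), Dom_jointure d1 d2 att → Spec_jointure d1 d2 att (jointure d1 d2 att)

-- ===== LEMMAS AND PROOFS =====

-- the index's bucket at c is exactly the att=c docs of d2, in order
theorem pvIndex_getD (d2 : List (Int × List (String × Int))) (att : String) (c : Option Int) :
    (pvIndex d2 att).getD c [] = (d2.filter (fun q => pvGetAtt q.2 att == c)).map (·.2) := by
  unfold pvIndex
  have h : d2.foldl (fun d q => d.modify (pvGetAtt q.2 att) [] (· ++ [q.2])) PySem.Dict.empty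
      = (d2.map (fun q => (pvGetAtt q.2 att, q.2))).foldl
          (fun d p => d.modify p.1 [] (· ++ [p.2])) PySem.Dict.empty := by
    rw [List.foldl_map]
  rw [h, PySem.Dict.getD_foldl_modify_append, List.filter_map, List.map_map]
  simp [PySem.Dict.getD_empty, Function.comp_def]

theorem jointure_eq_alt (d1 : List (Int × List (String × Int))) (d2 : List (Int × List (String × Int))) (att : String) :
    jointure d1 d2 att = jointure_alt d1 d2 att := by
  unfold jointure jointure_alt
  apply PySem.List.foldl_congr_mem
  intro acc p _
  rw [PySem.List.foldl_append_if, pvIndex_getD, List.map_map]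
  have hf : (fun q : Int × List (String × Int) => pvGetAtt p.2 att == pvGetAtt q.2 att)
      = (fun q : Int × List (String × Int) => pvGetAtt q.2 att == pvGetAtt p.2 att) := by
    funext q; simp [eq_comm]
  rw [hf]
  rfl

-- ===== VERDICT (by name: the statement is the Claim_ definition above) =====
theorem jointure_spec : Claim_equal_jointure := by
  intro d1 d2 att _
  exact jointure_eq_alt d1 d2 att
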